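-- pv_equiv track=rewrite | github.com/riyatomar/usrproginst | sentence_check.py | remove_allpunc
-- ===== SOURCE A (Python) =====
-- def remove_allpunc(sentence):
--     # define punctuation
--     punctuations = [",", "#", "(", ")", ":", ";", "-", "%", "'", '"', "’", "‘", "*", "&", "@","!", "/", "$", "^", "="]
--     within_angle_brackets = False
--
--     result = ""
--     for char in sentence:
--         if char == "<":
--             within_angle_brackets = True
--         elif char == ">":
--             within_angle_brackets = False
--
--         if not within_angle_brackets and char in punctuations:
--             char = " "
--
--         result += char
--
--     return result
-- ===== SOURCE B (Python) =====
-- _PUNCT = ",#():;-%'\"\u2019\u2018*&@!/$^="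
-- _TABLE = str.maketrans({c: " " for c in _PUNCT})
--
-- def remove_allpunc(sentence):
--     # segment decomposition: translate outside segments, copy bracket segments
--     parts = []
--     i, n = 0, len(sentence)
--     while i < n:
--         j = sentence.find("<", i)
--         if j == -1:
--             parts.append(sentence[i:].translate(_TABLE))
--             break
--         parts.append(sentence[i:j].translate(_TABLE))
--         k = sentence.find(">", j)
--         if k == -1:
--             parts.append(sentence[j:])
--             break
--         parts.append(sentence[j:k])
--         i = k
--     return "".join(parts)
-- ===== Notes on version B (the rewrite author's own statement) =====
-- stated objective: idiomatic
-- what changed: Replaces the per-character inside-brackets flag machine with a segment decomposition: find-based splitting into outside/inside segments, str.translate on outside segments, join.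
import Mathlib
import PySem

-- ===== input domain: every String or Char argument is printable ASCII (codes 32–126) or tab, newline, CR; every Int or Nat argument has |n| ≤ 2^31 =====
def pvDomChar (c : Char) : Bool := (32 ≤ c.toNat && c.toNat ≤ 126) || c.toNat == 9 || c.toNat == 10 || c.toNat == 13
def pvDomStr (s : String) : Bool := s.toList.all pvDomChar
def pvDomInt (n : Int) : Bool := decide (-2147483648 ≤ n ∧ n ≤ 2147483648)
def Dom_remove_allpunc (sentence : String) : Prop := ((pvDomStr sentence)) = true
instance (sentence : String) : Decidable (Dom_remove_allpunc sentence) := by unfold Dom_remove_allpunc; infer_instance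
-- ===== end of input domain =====

-- B replaces A's per-character inside-brackets flag machine by a segment decomposition
-- (split at '<'…'>' boundaries, translate outside segments, join); objective: idiomatic.

-- ===== PORT A =====
-- A's punctuation list (the two non-ASCII quotes are kept for fidelity; they cannot occur in Dom).
def pvPunct : List Char :=
  [',', '#', '(', ')', ':', ';', '-', '%', '\'', '"', '’', '‘', '*', '&', '@', '!', '/', '$', '^', '=']

def remove_allpunc (sentence : String) : String :=
  String.ofList ((sentence.toList.foldl (fun (st : Bool × List Char) char =>
    let within := if char = '<' then true else if char = '>' then false else st.1
    let char' := if !within && pvPunct.contains char then ' ' else char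
    (within, st.2 ++ [char'])) (false, [])).2)

-- ===== PORT B =====
-- Source B's translation table: punctuation ↦ ' ', everything else unchanged
def pvTr (c : Char) : Char := if pvPunct.contains c then ' ' else c

-- Source B's loop: find '<' (span), translate the outside slice, find '>' (span), copy the inside slice
def pvSegGo (cs : List Char) : List Char :=
  match h : cs.dropWhile (· ≠ '<') with
  | [] => (cs.takeWhile (· ≠ '<')).map pvTr
  | c :: tl =>
      (cs.takeWhile (· ≠ '<')).map pvTr ++ (c :: tl).takeWhile (· ≠ '>')
        ++ pvSegGo ((c :: tl).dropWhile (· ≠ '>'))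
termination_by cs.length
decreasing_by
  have h1 : (cs.dropWhile (· ≠ '<')).length ≤ cs.length :=
    List.length_dropWhile_le _ _
  have hhd := List.head?_dropWhile_not (fun x => decide (x ≠ '<')) cs
  rw [h] at hhd h1
  simp only [List.head?_cons] at hhd
  simp only [ne_eq] at hhd
  simp at hhd
  have h2 : ((c :: tl).dropWhile (· ≠ '>')).length ≤ tl.length := by
    rw [List.dropWhile_cons]
    simp only [hhd]
    simp
    exact List.length_dropWhile_le _ _
  simp only [List.length_cons] at h1
  omega

def remove_allpunc_alt (sentence : String) : String :=
  String.ofList (pvSegGo sentence.toList)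

-- ===== PRECONDITION & SPEC =====
def Spec_remove_allpunc (sentence : String) (out : String) : Prop := out = remove_allpunc_alt sentence
instance (sentence : String) (out : String) : Decidable (Spec_remove_allpunc sentence out) := by unfold Spec_remove_allpunc; infer_instance

-- ===== CLAIM (what is proved, stated in full; the proofs are below) =====
def Claim_equal_remove_allpunc : Prop := ∀ (sentence : String), Dom_remove_allpunc sentence → Spec_remove_allpunc sentence (remove_allpunc sentence)

-- ===== LEMMAS AND PROOFS =====

-- A's machine written as structural recursion on the character list
def pvARun (flag : Bool) : List Char → List Char
  | [] => []
  | c :: cs =>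
    let within := if c = '<' then true else if c = '>' then false else flag
    let c' := if !within && pvPunct.contains c then ' ' else c
    c' :: pvARun within cs

theorem pvFoldl_eq_aRun (cs : List Char) (flag : Bool) (acc : List Char) :
    (cs.foldl (fun (st : Bool × List Char) char =>
      let within := if char = '<' then true else if char = '>' then false else st.1
      let char' := if !within && pvPunct.contains char then ' ' else char
      (within, st.2 ++ [char'])) (flag, acc)).2 = acc ++ pvARun flag cs := by
  induction cs generalizing flag acc with
  | nil => simp [pvARun]
  | cons c cs ih =>
    simp only [List.foldl_cons]
    rw [ih]
    simp [pvARun]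

theorem pvARun_true (cs : List Char) :
    pvARun true cs = cs.takeWhile (· ≠ '>') ++ pvARun false (cs.dropWhile (· ≠ '>')) := by
  induction cs with
  | nil => simp [pvARun]
  | cons c cs ih =>
    by_cases hc : c = '>'
    · subst hc; simp [pvARun]
    · simp [pvARun, hc, ih]

theorem pvSegGo_eq_branch (cs : List Char) :
    pvSegGo cs = ((cs.takeWhile (· ≠ '<')).map pvTr) ++
      (match cs.dropWhile (· ≠ '<') with
       | [] => []
       | c :: tl => (c :: tl).takeWhile (· ≠ '>') ++ pvSegGo ((c :: tl).dropWhile (· ≠ '>'))) := by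
  rw [pvSegGo.eq_def]
  split <;> rename_i heq <;> rw [heq] <;> simp

theorem pvSegGo_nil : pvSegGo [] = [] := by
  rw [pvSegGo_eq_branch]; simp

theorem pvSegGo_cons_ne (c : Char) (cs : List Char) (hc : c ≠ '<') :
    pvSegGo (c :: cs) = pvTr c :: pvSegGo cs := by
  have hd : (c :: cs).dropWhile (· ≠ '<') = cs.dropWhile (· ≠ '<') := by
    rw [List.dropWhile_cons]; simp [hc]
  have ht : (c :: cs).takeWhile (· ≠ '<') = c :: cs.takeWhile (· ≠ '<') := by
    rw [List.takeWhile_cons]; simp [hc]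
  rw [pvSegGo_eq_branch (c :: cs), pvSegGo_eq_branch cs, hd, ht]
  simp

theorem pvSegGo_lt (cs : List Char) :
    pvSegGo ('<' :: cs) =
      '<' :: (cs.takeWhile (· ≠ '>') ++ pvSegGo (cs.dropWhile (· ≠ '>'))) := by
  have hd : ('<' :: cs).dropWhile (· ≠ '<') = '<' :: cs := by
    rw [List.dropWhile_cons]; simp
  have ht : ('<' :: cs).takeWhile (· ≠ '<') = ([] : List Char) := by
    rw [List.takeWhile_cons]; simp
  rw [pvSegGo_eq_branch, hd, ht]
  simp

theorem pvARun_false_eq_segGo_fuel (n : Nat) (cs : List Char) (hn : cs.length ≤ n) :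
    pvARun false cs = pvSegGo cs := by
  induction n generalizing cs with
  | zero =>
    have : cs = [] := List.eq_nil_of_length_eq_zero (Nat.le_zero.mp hn)
    subst this
    rw [pvSegGo_nil]; simp [pvARun]
  | succ n ih =>
    cases cs with
    | nil => rw [pvSegGo_nil]; simp [pvARun]
    | cons c cs =>
      have hn' : cs.length ≤ n := by simp only [List.length_cons] at hn; omega
      by_cases hc : c = '<'
      · subst hc
        have hrec := ih (cs.dropWhile (· ≠ '>')) (le_trans (List.length_dropWhile_le _ _) hn')
        have hA : pvARun false ('<' :: cs) = '<' :: pvARun true cs := by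
          simp [pvARun, pvPunct]
        rw [hA, pvARun_true, hrec, pvSegGo_lt]
      · have hA : pvARun false (c :: cs) = pvTr c :: pvARun false cs := by
          by_cases hg : c = '>'
          · subst hg; simp [pvARun, pvTr, pvPunct]
          · simp [pvARun, pvTr, hc, hg]
        rw [hA, pvSegGo_cons_ne c cs hc, ih cs hn']

-- ===== VERDICT (by name: the statement is the Claim_ definition above) =====
theorem remove_allpunc_spec : Claim_equal_remove_allpunc := by
  intro sentence _
  unfold Spec_remove_allpunc remove_allpunc remove_allpunc_alt
  rw [pvFoldl_eq_aRun, pvARun_false_eq_segGo_fuel sentence.toList.length sentence.toList le_rfl]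
  simp
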